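-- pv_equiv track=rewrite | github.com/timmcca-be/advent-2025 | day_9/main.py | does_path_cross_lines
-- ===== SOURCE A (Python) =====
-- def do_lines_cross(line, ref):
--     line_start, line_end = line
--     ref_start, ref_end = ref
--
--     line_start_x, line_start_y = line_start
--     line_end_x, line_end_y = line_end
--     ref_start_x, ref_start_y = ref_start
--     ref_end_x, ref_end_y = ref_end
--
--     is_line_horizontal = line_start_y == line_end_y
--     is_ref_horizontal = ref_start_y == ref_end_y
--
--     if is_line_horizontal and not is_ref_horizontal:
--         return (
--             ref_start_y < line_start_y < ref_end_y and
--             line_start_x < ref_start_x < line_end_x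
--         )
--
--     if not is_line_horizontal and is_ref_horizontal:
--         return (
--             line_start_y < ref_start_y < line_end_y and
--             ref_start_x < line_start_x < ref_end_x
--         )
--
--     return False
--
-- def does_path_cross_lines(adjusted_boundaries, start, end):
--     start_x, start_y = start
--     end_x, end_y = end
--     min_x, max_x = (start_x, end_x) if start_x < end_x else (end_x, start_x)
--     min_y, max_y = (start_y, end_y) if start_y < end_y else (end_y, start_y)
--     lines = [
--         ((min_x, min_y), (min_x, max_y)),
--         ((min_x, min_y), (max_x, min_y)),
--         ((min_x, max_y), (max_x, max_y)),
--         ((max_x, min_y), (max_x, max_y)),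
--     ]
--     return any(
--         do_lines_cross(line, ref)
--         for line in lines
--         for ref in adjusted_boundaries
--     )
-- ===== SOURCE B (Python) =====
-- def does_path_cross_lines(adjusted_boundaries, start, end):
--     start_x, start_y = start
--     end_x, end_y = end
--     min_x, max_x = (start_x, end_x) if start_x < end_x else (end_x, start_x)
--     min_y, max_y = (start_y, end_y) if start_y < end_y else (end_y, start_y)
--     return any(
--         (min_x < rsx < max_x and (rsy < min_y < rey or rsy < max_y < rey))
--         if rsy != rey else
--         (min_y < rsy < max_y and (rsx < min_x < rex or rsx < max_x < rex))
--         for (rsx, rsy), (rex, rey) in adjusted_boundaries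
--     )
-- ===== Notes on version B (the rewrite author's own statement) =====
-- stated objective: simpler
-- what changed: Replaces the four synthesized rectangle edges plus the generic do_lines_cross helper (a 4xN double scan) with a single pass over the boundaries that classifies each boundary as horizontal or vertical and tests the rectangle strip conditions directly.
import Mathlib
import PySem

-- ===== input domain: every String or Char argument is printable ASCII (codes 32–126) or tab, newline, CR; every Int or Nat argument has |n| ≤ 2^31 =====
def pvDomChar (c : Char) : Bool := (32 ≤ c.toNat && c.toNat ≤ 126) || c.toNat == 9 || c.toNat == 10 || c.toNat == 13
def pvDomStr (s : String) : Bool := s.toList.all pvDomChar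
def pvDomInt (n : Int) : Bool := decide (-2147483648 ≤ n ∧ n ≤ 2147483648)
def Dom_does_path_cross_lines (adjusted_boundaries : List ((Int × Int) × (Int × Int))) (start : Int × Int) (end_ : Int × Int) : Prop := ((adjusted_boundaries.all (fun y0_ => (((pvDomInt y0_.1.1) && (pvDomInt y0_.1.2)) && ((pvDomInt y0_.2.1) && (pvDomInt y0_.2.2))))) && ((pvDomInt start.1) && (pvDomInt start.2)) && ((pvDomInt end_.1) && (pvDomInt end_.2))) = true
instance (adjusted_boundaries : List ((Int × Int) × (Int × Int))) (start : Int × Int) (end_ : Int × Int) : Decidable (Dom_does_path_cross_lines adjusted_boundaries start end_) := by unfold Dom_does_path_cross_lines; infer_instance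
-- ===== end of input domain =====

-- B replaces the four synthesized rectangle edges and the generic do_lines_cross helper
-- (a 4×N double scan) by one pass over the boundaries classifying each as horizontal or
-- vertical; objective: simpler.

-- ===== PORT A =====
def do_lines_cross (line ref : (Int × Int) × (Int × Int)) : Bool :=
  let line_start_x := line.1.1; let line_start_y := line.1.2
  let line_end_x := line.2.1; let line_end_y := line.2.2
  let ref_start_x := ref.1.1; let ref_start_y := ref.1.2
  let ref_end_x := ref.2.1; let ref_end_y := ref.2.2
  let is_line_horizontal := line_start_y == line_end_y
  let is_ref_horizontal := ref_start_y == ref_end_y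
  if is_line_horizontal && !is_ref_horizontal then
    (decide (ref_start_y < line_start_y) && decide (line_start_y < ref_end_y)) &&
    (decide (line_start_x < ref_start_x) && decide (ref_start_x < line_end_x))
  else if !is_line_horizontal && is_ref_horizontal then
    (decide (line_start_y < ref_start_y) && decide (ref_start_y < line_end_y)) &&
    (decide (ref_start_x < line_start_x) && decide (line_start_x < ref_end_x))
  else
    false

def does_path_cross_lines (adjusted_boundaries : List ((Int × Int) × (Int × Int))) (start : Int × Int) (end_ : Int × Int) : Bool :=
  let start_x := start.1; let start_y := start.2
  let end_x := end_.1; let end_y := end_.2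
  let mm_x := if start_x < end_x then (start_x, end_x) else (end_x, start_x)
  let mm_y := if start_y < end_y then (start_y, end_y) else (end_y, start_y)
  let min_x := mm_x.1; let max_x := mm_x.2
  let min_y := mm_y.1; let max_y := mm_y.2
  let lines : List ((Int × Int) × (Int × Int)) :=
    [ ((min_x, min_y), (min_x, max_y)),
      ((min_x, min_y), (max_x, min_y)),
      ((min_x, max_y), (max_x, max_y)),
      ((max_x, min_y), (max_x, max_y)) ]
  lines.any (fun line => adjusted_boundaries.any (fun ref => do_lines_cross line ref))

-- ===== PORT B =====
def does_path_cross_lines_alt (adjusted_boundaries : List ((Int × Int) × (Int × Int))) (start : Int × Int) (end_ : Int × Int) : Bool :=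
  let start_x := start.1; let start_y := start.2
  let end_x := end_.1; let end_y := end_.2
  let mm_x := if start_x < end_x then (start_x, end_x) else (end_x, start_x)
  let mm_y := if start_y < end_y then (start_y, end_y) else (end_y, start_y)
  let min_x := mm_x.1; let max_x := mm_x.2
  let min_y := mm_y.1; let max_y := mm_y.2
  adjusted_boundaries.any (fun ref =>
    let rsx := ref.1.1; let rsy := ref.1.2
    let rex := ref.2.1; let rey := ref.2.2
    if rsy != rey then
      (decide (min_x < rsx) && decide (rsx < max_x)) &&
      ((decide (rsy < min_y) && decide (min_y < rey)) || (decide (rsy < max_y) && decide (max_y < rey)))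
    else
      (decide (min_y < rsy) && decide (rsy < max_y)) &&
      ((decide (rsx < min_x) && decide (min_x < rex)) || (decide (rsx < max_x) && decide (max_x < rex))))

-- ===== PRECONDITION & SPEC =====
def Spec_does_path_cross_lines (adjusted_boundaries : List ((Int × Int) × (Int × Int))) (start : Int × Int) (end_ : Int × Int) (out : Bool) : Prop := out = does_path_cross_lines_alt adjusted_boundaries start end_
instance (adjusted_boundaries : List ((Int × Int) × (Int × Int))) (start : Int × Int) (end_ : Int × Int) (out : Bool) : Decidable (Spec_does_path_cross_lines adjusted_boundaries start end_ out) := by unfold Spec_does_path_cross_lines; infer_instance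

-- ===== CLAIM (what is proved, stated in full; the proofs are below) =====
def Claim_equal_does_path_cross_lines : Prop := ∀ (adjusted_boundaries : List ((Int × Int) × (Int × Int))) (start : Int × Int) (end_ : Int × Int), Dom_does_path_cross_lines adjusted_boundaries start end_ → Spec_does_path_cross_lines adjusted_boundaries start end_ (does_path_cross_lines adjusted_boundaries start end_)

-- ===== LEMMAS AND PROOFS =====

-- swapping the two nested `any`s (the boolean OR of a finite family is commutative)
theorem any_or_distrib {β : Type} (R : List β) (g h : β → Bool) :
    R.any (fun r => g r || h r) = (R.any g || R.any h) := by
  induction R with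
  | nil => simp
  | cons r R ih =>
    simp only [List.any_cons, ih]
    cases g r <;> cases h r <;> cases R.any g <;> cases R.any h <;> rfl

-- pointwise: the four rectangle edges tested against one boundary equal B's classification
theorem edges_vs_one (min_x max_x min_y max_y : Int) (ref : (Int × Int) × (Int × Int)) :
    (do_lines_cross ((min_x, min_y), (min_x, max_y)) ref ||
     (do_lines_cross ((min_x, min_y), (max_x, min_y)) ref ||
      (do_lines_cross ((min_x, max_y), (max_x, max_y)) ref ||
       do_lines_cross ((max_x, min_y), (max_x, max_y)) ref))) =
    (if ref.1.2 != ref.2.2 then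
      (decide (min_x < ref.1.1) && decide (ref.1.1 < max_x)) &&
      ((decide (ref.1.2 < min_y) && decide (min_y < ref.2.2)) || (decide (ref.1.2 < max_y) && decide (max_y < ref.2.2)))
    else
      (decide (min_y < ref.1.2) && decide (ref.1.2 < max_y)) &&
      ((decide (ref.1.1 < min_x) && decide (min_x < ref.2.1)) || (decide (ref.1.1 < max_x) && decide (max_x < ref.2.1)))) := by
  obtain ⟨⟨rsx, rsy⟩, rex, rey⟩ := ref
  simp only [do_lines_cross]
  split_ifs <;> (rw [Bool.eq_iff_iff]; simp_all <;> omega)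

-- ===== VERDICT (by name: the statement is the Claim_ definition above) =====
theorem does_path_cross_lines_spec : Claim_equal_does_path_cross_lines := by
  intro bs start end_ _
  unfold Spec_does_path_cross_lines does_path_cross_lines does_path_cross_lines_alt
  dsimp only
  simp only [List.any_cons, List.any_nil, Bool.or_false]
  -- push the outer 4-element any through to a single any over bs
  rw [← any_or_distrib, ← any_or_distrib, ← any_or_distrib]
  exact List.any_congr rfl fun ref => edges_vs_one _ _ _ _ ref
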